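-- pv_equiv track=rewrite | github.com/LLNL/axom | src/axom/mir/scripts/clip_table_generator_hexahedron.py | isHexCaseFifteen
-- ===== SOURCE A (Python) =====
-- def getAdjacentVertices( vertex ):
--     if vertex == 0:
--         return [1,3,4]
--     elif vertex == 1:
--         return [0,2,5]
--     elif vertex == 2:
--         return [1,3,6]
--     elif vertex == 3:
--         return [0,2,7]
--     elif vertex == 4:
--         return [0,5,7]
--     elif vertex == 5:
--         return [1,4,6]
--     elif vertex == 6:
--         return [2,5,7]
--     elif vertex == 7:
--         return [3,4,6]
--
-- def isHexCaseFifteen( onBits, offBits ):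
--     if len( onBits ) == 4 or len( offBits ) == 4:
--         if len( onBits ) == 4:
--             clipBits = onBits
--             nonClipBits = offBits
--         else:
--             clipBits = offBits
--             nonClipBits = onBits
--
--         # Is Case Fifteen
--         for cv in clipBits:
--             cvNeighbors = getAdjacentVertices( cv )
--             # Check if all of the current clip vertex's neighbors are also in clipBits
--             if set(cvNeighbors).issubset(clipBits):
--                 return True
--         return False
--     else:
--         return False
-- ===== SOURCE B (Python) =====
-- # Table lookup: the 8 valid "corner" configurations, one per vertex v: {v} + its three neighbors.
-- _VALID_CONFIGS = {
--     frozenset({0, 1, 3, 4}),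
--     frozenset({1, 0, 2, 5}),
--     frozenset({2, 1, 3, 6}),
--     frozenset({3, 0, 2, 7}),
--     frozenset({4, 0, 5, 7}),
--     frozenset({5, 1, 4, 6}),
--     frozenset({6, 2, 5, 7}),
--     frozenset({7, 3, 4, 6}),
-- }
--
-- def isHexCaseFifteen(onBits, offBits):
--     if len(onBits) == 4:
--         clipBits = onBits
--     elif len(offBits) == 4:
--         clipBits = offBits
--     else:
--         return False
--     return frozenset(clipBits) in _VALID_CONFIGS
-- ===== Notes on version B (the rewrite author's own statement) =====
-- stated objective: simpler
-- what changed: Replaces the per-vertex neighbor-scan loop with a single membership test of frozenset(clipBits) against a precomputed table of the 8 valid corner configurations.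
-- outside the precondition, e.g. on isHexCaseFifteen([0, 1, 2, 8], []): A raises TypeError, B returns False
-- crash fix: When one of the two lists has length 4 and that list contains a vertex outside 0..7, A raises TypeError (set(None) from getAdjacentVertices) while B returns False. — e.g. on isHexCaseFifteen([0,1,2,8], []): A raises TypeError, B returns false
import Mathlib
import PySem

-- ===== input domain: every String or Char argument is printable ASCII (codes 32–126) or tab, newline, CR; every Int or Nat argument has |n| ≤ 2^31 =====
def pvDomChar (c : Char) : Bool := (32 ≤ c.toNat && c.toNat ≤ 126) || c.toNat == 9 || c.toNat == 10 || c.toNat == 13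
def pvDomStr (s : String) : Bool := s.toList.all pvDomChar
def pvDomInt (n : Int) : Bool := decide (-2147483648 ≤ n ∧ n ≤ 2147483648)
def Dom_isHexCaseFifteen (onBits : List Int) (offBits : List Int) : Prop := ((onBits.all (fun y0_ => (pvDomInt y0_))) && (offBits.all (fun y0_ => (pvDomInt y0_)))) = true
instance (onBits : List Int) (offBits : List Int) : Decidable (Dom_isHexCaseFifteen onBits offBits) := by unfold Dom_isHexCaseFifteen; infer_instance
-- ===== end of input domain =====

-- B replaces A's per-vertex neighbor-scan loop with one membership test of frozenset(clipBits)
-- against a precomputed table of the 8 valid corner configurations (objective: simpler).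

-- ===== PORT A =====
-- getAdjacentVertices: none models Python's implicit 'return None' for vertices outside 0..7.
def getAdjacentVertices (vertex : Int) : Option (List Int) :=
  if vertex = 0 then some [1,3,4]
  else if vertex = 1 then some [0,2,5]
  else if vertex = 2 then some [1,3,6]
  else if vertex = 3 then some [0,2,7]
  else if vertex = 4 then some [0,5,7]
  else if vertex = 5 then some [1,4,6]
  else if vertex = 6 then some [2,5,7]
  else if vertex = 7 then some [3,4,6]
  else none

-- the 'for cv in clipBits' loop; on 'none' Python raises TypeError (set(None)) — excluded by Pre_.
def hexLoopA (clipBits : List Int) : List Int → Bool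
  | [] => false
  | cv :: rest =>
    match getAdjacentVertices cv with
    | some cvNeighbors =>
      if (PySem.Set.ofList cvNeighbors).issubset clipBits then true
      else hexLoopA clipBits rest
    | none => false   -- Python raises TypeError here; outside Pre_isHexCaseFifteen

def isHexCaseFifteen (onBits : List Int) (offBits : List Int) : Bool :=
  if onBits.length = 4 ∨ offBits.length = 4 then
    let clipBits := if onBits.length = 4 then onBits else offBits
    hexLoopA clipBits clipBits
  else
    false

-- ===== PORT B =====
-- the 8 valid corner configurations, one per vertex v: {v} ∪ its three neighbors
def validConfigs : List (PySem.Set Int) :=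
  [ PySem.Set.ofList [0,1,3,4], PySem.Set.ofList [1,0,2,5],
    PySem.Set.ofList [2,1,3,6], PySem.Set.ofList [3,0,2,7],
    PySem.Set.ofList [4,0,5,7], PySem.Set.ofList [5,1,4,6],
    PySem.Set.ofList [6,2,5,7], PySem.Set.ofList [7,3,4,6] ]

def isHexCaseFifteen_alt (onBits : List Int) (offBits : List Int) : Bool :=
  if onBits.length = 4 then
    validConfigs.any (fun c => PySem.Set.equal (PySem.Set.ofList onBits) c)
  else if offBits.length = 4 then
    validConfigs.any (fun c => PySem.Set.equal (PySem.Set.ofList offBits) c)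
  else
    false

-- ===== PRECONDITION & SPEC =====
-- Pre_ excludes exactly the inputs where A raises TypeError: the length-4 list A picks as
-- clipBits contains a vertex outside 0..7, so getAdjacentVertices returns None and set(None) raises.
def Pre_isHexCaseFifteen (onBits : List Int) (offBits : List Int) : Prop :=
  (onBits.length = 4 → ∀ x ∈ onBits, 0 ≤ x ∧ x ≤ 7) ∧
  (onBits.length ≠ 4 → offBits.length = 4 → ∀ x ∈ offBits, 0 ≤ x ∧ x ≤ 7)
instance (onBits : List Int) (offBits : List Int) : Decidable (Pre_isHexCaseFifteen onBits offBits) := by unfold Pre_isHexCaseFifteen; infer_instance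

def pvWitness_isHexCaseFifteen : List Int × List Int := ([0,1,3,4], [2,5,6,7])

-- A raises TypeError when the length-4 list it picks contains a vertex outside 0..7; B returns False there.
def Raises_isHexCaseFifteen (onBits : List Int) (offBits : List Int) : Prop :=
  (onBits.length = 4 ∧ ¬ (∀ x ∈ onBits, 0 ≤ x ∧ x ≤ 7)) ∨
  (onBits.length ≠ 4 ∧ offBits.length = 4 ∧ ¬ (∀ x ∈ offBits, 0 ≤ x ∧ x ≤ 7))
instance (onBits : List Int) (offBits : List Int) : Decidable (Raises_isHexCaseFifteen onBits offBits) := by unfold Raises_isHexCaseFifteen; infer_instance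

def pvRaiseWitness_isHexCaseFifteen : List Int × List Int := ([0,1,2,8], [])
def pvRaiseWitnessOut_isHexCaseFifteen : Bool := false

def Spec_isHexCaseFifteen (onBits : List Int) (offBits : List Int) (out : Bool) : Prop := out = isHexCaseFifteen_alt onBits offBits
instance (onBits : List Int) (offBits : List Int) (out : Bool) : Decidable (Spec_isHexCaseFifteen onBits offBits out) := by unfold Spec_isHexCaseFifteen; infer_instance

-- ===== CLAIM (what is proved, stated in full; the proofs are below) =====
def Claim_equal_isHexCaseFifteen : Prop := ∀ (onBits : List Int) (offBits : List Int), Dom_isHexCaseFifteen onBits offBits → Pre_isHexCaseFifteen onBits offBits → Spec_isHexCaseFifteen onBits offBits (isHexCaseFifteen onBits offBits)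

def Claim_raises_isHexCaseFifteen : Prop := (∀ (onBits : List Int) (offBits : List Int), Dom_isHexCaseFifteen onBits offBits → Raises_isHexCaseFifteen onBits offBits → ¬ Pre_isHexCaseFifteen onBits offBits) ∧ (Dom_isHexCaseFifteen (pvRaiseWitness_isHexCaseFifteen.1) (pvRaiseWitness_isHexCaseFifteen.2) ∧ Raises_isHexCaseFifteen (pvRaiseWitness_isHexCaseFifteen.1) (pvRaiseWitness_isHexCaseFifteen.2) ∧ isHexCaseFifteen_alt (pvRaiseWitness_isHexCaseFifteen.1) (pvRaiseWitness_isHexCaseFifteen.2) = pvRaiseWitnessOut_isHexCaseFifteen)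

-- ===== LEMMAS AND PROOFS =====

-- finite core over Fin 8, checked once by the kernel
theorem hexKeyFin : ∀ (a b c d : Fin 8),
    (fun clip => hexLoopA clip clip = validConfigs.any (fun c => PySem.Set.equal (PySem.Set.ofList clip) c))
      [(a : Int), (b : Int), (c : Int), (d : Int)] := by decide

-- core: for a length-4 list of in-range vertices, A's loop equals B's table lookup
theorem hexKey (clip : List Int) (hl : clip.length = 4)
    (hr : ∀ x ∈ clip, 0 ≤ x ∧ x ≤ 7) :
    hexLoopA clip clip = validConfigs.any (fun c => PySem.Set.equal (PySem.Set.ofList clip) c) := by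
  match clip, hl with
  | [a, b, c, d], _ =>
    obtain ⟨⟨ha0, ha7⟩, ⟨hb0, hb7⟩, ⟨hc0, hc7⟩, ⟨hd0, hd7⟩⟩ :
        (0 ≤ a ∧ a ≤ 7) ∧ (0 ≤ b ∧ b ≤ 7) ∧ (0 ≤ c ∧ c ≤ 7) ∧ (0 ≤ d ∧ d ≤ 7) := by
      exact ⟨hr a (by simp), hr b (by simp), hr c (by simp), hr d (by simp)⟩
    have ea : ((⟨a.toNat, by omega⟩ : Fin 8) : Int) = a := by simp [Int.toNat_of_nonneg ha0]
    have eb : ((⟨b.toNat, by omega⟩ : Fin 8) : Int) = b := by simp [Int.toNat_of_nonneg hb0]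
    have ec : ((⟨c.toNat, by omega⟩ : Fin 8) : Int) = c := by simp [Int.toNat_of_nonneg hc0]
    have ed : ((⟨d.toNat, by omega⟩ : Fin 8) : Int) = d := by simp [Int.toNat_of_nonneg hd0]
    have := hexKeyFin ⟨a.toNat, by omega⟩ ⟨b.toNat, by omega⟩ ⟨c.toNat, by omega⟩ ⟨d.toNat, by omega⟩
    simpa [ea, eb, ec, ed] using this

-- ===== VERDICT (by name: the statement is the Claim_ definition above) =====
theorem isHexCaseFifteen_spec : Claim_equal_isHexCaseFifteen := by
  intro onBits offBits _ hpre
  unfold Spec_isHexCaseFifteen isHexCaseFifteen isHexCaseFifteen_alt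
  obtain ⟨h1, h2⟩ := hpre
  by_cases hon : onBits.length = 4
  · simp only [hon, if_pos, true_or]
    exact hexKey onBits hon (h1 hon)
  · by_cases hoff : offBits.length = 4
    · simp only [hon, hoff, or_true, if_true, if_false]
      exact hexKey offBits hoff (h2 hon hoff)
    · simp [hon, hoff]

theorem isHexCaseFifteen_raises : Claim_raises_isHexCaseFifteen := by
  unfold Claim_raises_isHexCaseFifteen
  refine ⟨?_, by decide⟩
  intro onBits offBits _ hr hpre
  obtain ⟨h1, h2⟩ := hpre
  rcases hr with ⟨hl, hbad⟩ | ⟨hl, hl2, hbad⟩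
  · exact hbad (h1 hl)
  · exact hbad (h2 hl hl2)

-- self-check: the raise witness itself lies outside Pre_ (an instance of isHexCaseFifteen_raises)
theorem pvRaiseWitness_isHexCaseFifteen_ok :
    ¬ Pre_isHexCaseFifteen pvRaiseWitness_isHexCaseFifteen.1 pvRaiseWitness_isHexCaseFifteen.2 :=
  isHexCaseFifteen_raises.1 _ _ (by decide) (by decide)
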